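-- pv_equiv track=rewrite | github.com/Zenith1009/Sem6 | SS/Labs/PythonLabs/Lab5/ll1_parser.py | first_of_str
-- ===== SOURCE A (Python) =====
-- NT = ['E', 'A', 'T', 'B', 'F']   # A = E', B = T'
--
-- TM = ['i', '+', '*', '(', ')', '$']   # i = id
--
-- def nt_idx(c):
--     return NT.index(c) if c in NT else -1
--
-- def t_idx(c):
--     return TM.index(c) if c in TM else -1
--
-- def is_terminal(c):
--     return t_idx(c) != -1
--
-- def first_of_str(s, first_sets):
--     out = set()
--     if not s or s == 'e':
--         return {'e'}
--     for sym in s: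
--         if is_terminal(sym):
--             out.add(sym)
--             return out
--         ni = nt_idx(sym)
--         if ni == -1:
--             return out
--         out |= first_sets[ni] - {'e'}
--         if 'e' not in first_sets[ni]:
--             return out
--     out.add('e')
--     return out
-- ===== SOURCE B (Python) =====
-- NT = ['E', 'A', 'T', 'B', 'F']   # A = E', B = T'
--
-- TM = ['i', '+', '*', '(', ')', '$']   # i = id
--
-- def first_of_str(s, first_sets):
--     if not s or s == 'e':
--         return {'e'}
--     return _first_suffix(s, 0, first_sets)
--
-- def _first_suffix(s, i, first_sets):
--     # FIRST of the suffix s[i:]: empty suffix contributes epsilon; a terminal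
--     # stops with itself; an unknown symbol stops with nothing; a nullable
--     # nonterminal unions its FIRST (minus epsilon) with FIRST of the rest.
--     if i == len(s):
--         return {'e'}
--     sym = s[i]
--     if sym in TM:
--         return {sym}
--     if sym not in NT:
--         return set()
--     fi = first_sets[NT.index(sym)]
--     if 'e' in fi:
--         return (fi - {'e'}) | _first_suffix(s, i + 1, first_sets)
--     return fi - {'e'}
-- ===== Notes on version B (the rewrite author's own statement) =====
-- stated objective: alternative
-- what changed: Replaces the early-return loop threading a mutable accumulator set with a recursive helper over the string suffix that directly encodes the FIRST recurrence (terminal/unknown/nullable-nonterminal cases) and unions results right-to-left.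
import Mathlib
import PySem

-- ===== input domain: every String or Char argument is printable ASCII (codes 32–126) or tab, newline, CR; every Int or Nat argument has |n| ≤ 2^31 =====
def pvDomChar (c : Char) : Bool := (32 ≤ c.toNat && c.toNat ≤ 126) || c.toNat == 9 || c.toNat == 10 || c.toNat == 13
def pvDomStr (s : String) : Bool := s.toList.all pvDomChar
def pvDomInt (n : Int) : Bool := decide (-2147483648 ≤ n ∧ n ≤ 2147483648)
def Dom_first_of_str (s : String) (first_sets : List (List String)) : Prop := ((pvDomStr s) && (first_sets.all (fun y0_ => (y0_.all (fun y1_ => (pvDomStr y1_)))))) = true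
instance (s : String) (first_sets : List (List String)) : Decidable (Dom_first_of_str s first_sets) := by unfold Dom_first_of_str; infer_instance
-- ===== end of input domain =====

-- B replaces A's early-return loop with a mutable accumulator set by a recursive
-- helper over the string suffix encoding the FIRST recurrence (objective: alternative).
-- Outputs are Python sets; both ports produce them in the same canonical first-insertion order.

-- ===== PORT A =====
def pvNT : List Char := ['E', 'A', 'T', 'B', 'F']
def pvTM : List Char := ['i', '+', '*', '(', ')', '$']

def pv_nt_idx (c : Char) : Int :=
  if c ∈ pvNT then (((PySem.List.index? pvNT c).getD 0 : Nat) : Int) else -1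

def pv_t_idx (c : Char) : Int :=
  if c ∈ pvTM then (((PySem.List.index? pvTM c).getD 0 : Nat) : Int) else -1

def pv_is_terminal (c : Char) : Bool := pv_t_idx c != -1

-- the 'for sym in s' loop of A, threading the accumulator set 'out'
def pvLoopA : List Char → List (List String) → List String → List String
  | [], _, out => PySem.Set.add out "e"
  | sym :: rest, fs, out =>
    if pv_is_terminal sym then PySem.Set.add out (String.ofList [sym])
    else
      let ni := pv_nt_idx sym
      if ni = -1 then out
      else
        -- first_sets[ni]: Python raises IndexError when ni is out of range; Pre_ excludes that
        let fsi := (PySem.List.pyGet? fs ni).getD []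
        let out2 := PySem.Set.union out (PySem.Set.diff (PySem.Set.ofList fsi) ["e"])
        if !(decide ("e" ∈ fsi)) then out2
        else pvLoopA rest fs out2

def first_of_str (s : String) (first_sets : List (List String)) : List String :=
  if s = "" || s = "e" then ["e"]
  else pvLoopA s.toList first_sets []

-- ===== PORT B =====
-- _first_suffix of Source B: recursion over the suffix (the consumed prefix index becomes the tail)
def pvFirstSuffix : List Char → List (List String) → List String
  | [], _ => ["e"]
  | sym :: rest, fs =>
    if sym ∈ pvTM then [String.ofList [sym]]
    else if sym ∉ pvNT then []
    else
      let fsi := (PySem.List.pyGet? fs (((PySem.List.index? pvNT sym).getD 0 : Nat) : Int)).getD []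
      if "e" ∈ fsi then
        PySem.Set.union (PySem.Set.diff (PySem.Set.ofList fsi) ["e"]) (pvFirstSuffix rest fs)
      else PySem.Set.diff (PySem.Set.ofList fsi) ["e"]

def first_of_str_alt (s : String) (first_sets : List (List String)) : List String :=
  if s = "" || s = "e" then ["e"]
  else pvFirstSuffix s.toList first_sets

-- ===== PRECONDITION & SPEC =====
-- Pre_ excludes exactly the inputs where Python A raises IndexError: a position k whose
-- symbol is a nonterminal indexing past first_sets, reachable because every earlier
-- symbol is an in-range nonterminal whose FIRST set contains 'e'.
def Pre_first_of_str (s : String) (first_sets : List (List String)) : Prop :=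
  s = "" ∨ s = "e" ∨
    ∀ k < s.toList.length,
      (∀ j < k, (s.toList.getD j ' ') ∈ pvNT ∧
          pvNT.idxOf (s.toList.getD j ' ') < first_sets.length ∧
          "e" ∈ first_sets.getD (pvNT.idxOf (s.toList.getD j ' ')) []) →
      ((s.toList.getD k ' ') ∈ pvNT → pvNT.idxOf (s.toList.getD k ' ') < first_sets.length)

instance (s : String) (first_sets : List (List String)) : Decidable (Pre_first_of_str s first_sets) := by
  unfold Pre_first_of_str; infer_instance

def pvWitness_first_of_str : String × List (List String) :=
  ("TE", [["i", "e"], ["+", "e"], ["i"], ["*"], ["("]])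

def Spec_first_of_str (s : String) (first_sets : List (List String)) (out : List String) : Prop := out = first_of_str_alt s first_sets
instance (s : String) (first_sets : List (List String)) (out : List String) : Decidable (Spec_first_of_str s first_sets out) := by unfold Spec_first_of_str; infer_instance

-- ===== CLAIM (what is proved, stated in full; the proofs are below) =====
def Claim_equal_first_of_str : Prop := ∀ (s : String) (first_sets : List (List String)), Dom_first_of_str s first_sets → Pre_first_of_str s first_sets → Spec_first_of_str s first_sets (first_of_str s first_sets)

-- ===== LEMMAS AND PROOFS =====

-- folding (add b x) into a = adding x after folding b into a
theorem pv_foldl_add_add (b : List String) (a : List String) (x : String) :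
    (PySem.Set.add b x).foldl PySem.Set.add a = PySem.Set.add (b.foldl PySem.Set.add a) x := by
  by_cases hx : x ∈ b
  · rw [PySem.Set.add_of_mem hx, PySem.Set.add_of_mem]
    have : x ∈ b ∨ ∃ c ∈ b, x = id c := Or.inr ⟨x, hx, rfl⟩
    simpa using (PySem.Set.mem_foldl_add (f := id) (l := b) (s := a) (y := x)).2 (Or.inr ⟨x, hx, rfl⟩)
  · rw [PySem.Set.add_of_not_mem hx, List.foldl_append]
    rfl

-- fold-through: folding an already-folded set equals folding sequentially
theorem pv_foldl_add_assoc (c : List String) : ∀ (b a : List String),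
    (c.foldl PySem.Set.add b).foldl PySem.Set.add a = c.foldl PySem.Set.add (b.foldl PySem.Set.add a) := by
  induction c with
  | nil => intro b a; rfl
  | cons x c ih =>
    intro b a
    simp only [List.foldl_cons]
    rw [ih (PySem.Set.add b x) a, pv_foldl_add_add]

-- union is associative (on arbitrary underlying lists)
theorem pv_union_assoc (a b c : List String) :
    PySem.Set.union (PySem.Set.union a b) c = PySem.Set.union a (PySem.Set.union b c) := by
  have h1 : ∀ (x y : List String), PySem.Set.union x y = y.foldl PySem.Set.add x := fun _ _ => rfl
  rw [h1, h1, h1, h1, pv_foldl_add_assoc]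

-- A's loop equals 'out ∪ (B's helper)'
theorem pv_loop_eq_union (l : List Char) : ∀ (fs : List (List String)) (out : List String),
    pvLoopA l fs out = PySem.Set.union out (pvFirstSuffix l fs) := by
  induction l with
  | nil => intro fs out; rfl
  | cons sym rest ih =>
    intro fs out
    by_cases ht : sym ∈ pvTM
    · have hterm : pv_is_terminal sym = true := by
        simp [pv_is_terminal, pv_t_idx, ht, bne_iff_ne]
      simp only [pvLoopA, pvFirstSuffix, hterm, if_pos ht, if_true]
      rfl
    · have hterm : pv_is_terminal sym = false := by
        simp [pv_is_terminal, pv_t_idx, ht]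
      by_cases hn : sym ∈ pvNT
      · have hnot : ¬ sym ∉ pvNT := by simpa using hn
        have hni : pv_nt_idx sym = (((PySem.List.index? pvNT sym).getD 0 : Nat) : Int) := by
          simp [pv_nt_idx, hn]
        have hne : ¬ ((((PySem.List.index? pvNT sym).getD 0 : Nat) : Int) = -1) := by omega
        simp only [pvLoopA, pvFirstSuffix, hterm, Bool.false_eq_true, if_false, if_neg ht,
          if_neg hnot, hni, if_neg hne]
        set fsi := (PySem.List.pyGet? fs (((PySem.List.index? pvNT sym).getD 0 : Nat) : Int)).getD [] with hfsi
        by_cases he : "e" ∈ fsi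
        · simp only [he, decide_true, Bool.not_true, Bool.false_eq_true, if_false, if_true]
          rw [ih fs _, pv_union_assoc]
        · simp [he]
      · have hni : pv_nt_idx sym = -1 := by simp [pv_nt_idx, hn]
        simp only [pvLoopA, pvFirstSuffix, hterm, Bool.false_eq_true, if_false, if_neg ht,
          if_pos hn, hni]
        rfl

-- B's helper always returns a duplicate-free list
theorem pv_nodup_firstSuffix (l : List Char) : ∀ (fs : List (List String)), (pvFirstSuffix l fs).Nodup := by
  induction l with
  | nil => intro fs; simp [pvFirstSuffix]
  | cons sym rest ih =>
    intro fs
    by_cases ht : sym ∈ pvTM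
    · simp [pvFirstSuffix, ht]
    · by_cases hn : sym ∈ pvNT
      · have hnot : ¬ sym ∉ pvNT := by simpa using hn
        simp only [pvFirstSuffix, if_neg ht, if_neg hnot]
        split
        · exact PySem.Set.nodup_union _ _ (PySem.Set.nodup_diff _ _ (PySem.Set.nodup_ofList _))
        · exact PySem.Set.nodup_diff _ _ (PySem.Set.nodup_ofList _)
      · simp [pvFirstSuffix, ht, hn]

-- ===== VERDICT (by name: the statement is the Claim_ definition above) =====
theorem first_of_str_spec : Claim_equal_first_of_str := by
  intro s fs _ _
  unfold Spec_first_of_str first_of_str first_of_str_alt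
  split
  · rfl
  · rw [pv_loop_eq_union]
    show (pvFirstSuffix s.toList fs).foldl PySem.Set.add [] = _
    rw [← PySem.Set.ofList_eq_foldl]
    exact PySem.Set.ofList_eq_self_of_nodup _ (pv_nodup_firstSuffix s.toList fs)
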